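-- pv_equiv track=rewrite | github.com/aaronbittel/advent-of-code | solutions/day4/solution_day4.py | check_if_winning
-- ===== SOURCE A (Python) =====
-- def check_if_winning(winning_numbers, my_numbers):
--     winning_count = []
--     for index, lst in enumerate(my_numbers):
--         count = 0
--         for num in lst:
--             if num == "":
--                 continue
--             if num in winning_numbers[index]:
--                 count += 1
--         winning_count.append(count)
--     return winning_count
-- ===== SOURCE B (Python) =====
-- def check_if_winning(winning_numbers, my_numbers):
--     winning_count = []
--     for wins, mine in zip(winning_numbers, my_numbers):
--         filtered = [n for n in mine if n != ""]
--         freq = {}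
--         for n in filtered:
--             freq[n] = freq.get(n, 0) + 1
--         winning_count.append(sum(freq.get(w, 0) for w in set(wins)))
--     return winning_count
-- ===== Notes on version B (the rewrite author's own statement) =====
-- stated objective: faster
-- what changed: Instead of testing each my-number for membership in the winning list (nested scan), B builds a frequency dict of the non-empty my-numbers once per card and sums the looked-up counts over the distinct winning numbers.
-- outside the precondition, e.g. on check_if_winning([['zbcc1'], ['']], [[], ['', ''], []]): A returns [0, 0, 0], B returns [0, 0]
import Mathlib
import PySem

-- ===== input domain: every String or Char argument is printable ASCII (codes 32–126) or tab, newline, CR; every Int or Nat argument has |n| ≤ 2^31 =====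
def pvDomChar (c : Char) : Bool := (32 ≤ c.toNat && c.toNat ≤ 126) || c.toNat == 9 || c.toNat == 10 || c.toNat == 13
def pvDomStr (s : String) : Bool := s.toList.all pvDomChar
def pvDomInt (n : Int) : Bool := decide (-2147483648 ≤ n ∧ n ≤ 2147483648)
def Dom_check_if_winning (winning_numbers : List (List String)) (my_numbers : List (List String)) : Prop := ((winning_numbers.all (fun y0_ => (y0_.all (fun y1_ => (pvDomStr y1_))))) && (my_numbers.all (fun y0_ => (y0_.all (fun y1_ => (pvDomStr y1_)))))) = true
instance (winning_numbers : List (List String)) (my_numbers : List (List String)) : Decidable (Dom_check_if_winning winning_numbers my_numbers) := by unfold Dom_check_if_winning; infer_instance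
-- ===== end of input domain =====

-- B replaces A's per-card membership scan by a frequency dict of the non-empty my-numbers
-- summed over the distinct winning numbers (asymptotically fewer comparisons per card).

-- ===== PORT A =====
def check_if_winning (winning_numbers : List (List String)) (my_numbers : List (List String)) : List Int :=
  (PySem.List.enumerate my_numbers 0).foldl
    (fun winning_count p =>
      winning_count ++
        [p.2.foldl
          (fun count num =>
            if num = "" then count
            else if (PySem.List.pyGetD winning_numbers p.1 []).contains num then count + 1
            else count)
          (0 : Int)])
    []

-- ===== PORT B =====
def check_if_winning_alt (winning_numbers : List (List String)) (my_numbers : List (List String)) : List Int :=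
  (winning_numbers.zip my_numbers).foldl
    (fun winning_count p =>
      let filtered := p.2.filter (fun n => n ≠ "")
      let freq : PySem.Dict String Int :=
        filtered.foldl (fun d n => d.insert n (d.getD n 0 + 1)) PySem.Dict.empty
      winning_count ++
        [(PySem.Set.ofList p.1).foldl (fun s w => s + freq.getD w 0) (0 : Int)])
    []

-- ===== PRECONDITION & SPEC =====
-- Pre_ excludes the malformed case where my_numbers is longer than winning_numbers: there A
-- raises IndexError as soon as an extra card holds a non-empty string, and only when every extra
-- card holds nothing but "" does it return accidental trailing zeros, a corner no one would
-- specify; B's zip stops at the paired cards there.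
def Pre_check_if_winning (winning_numbers : List (List String)) (my_numbers : List (List String)) : Prop :=
  my_numbers.length ≤ winning_numbers.length
instance (winning_numbers : List (List String)) (my_numbers : List (List String)) : Decidable (Pre_check_if_winning winning_numbers my_numbers) := by unfold Pre_check_if_winning; infer_instance

def pvWitness_check_if_winning : List (List String) × List (List String) :=
  ([["1", "2", "3"], ["7"]], [["1", "", "1"], ["8"]])

def Spec_check_if_winning (winning_numbers : List (List String)) (my_numbers : List (List String)) (out : List Int) : Prop := out = check_if_winning_alt winning_numbers my_numbers
instance (winning_numbers : List (List String)) (my_numbers : List (List String)) (out : List Int) : Decidable (Spec_check_if_winning winning_numbers my_numbers out) := by unfold Spec_check_if_winning; infer_instance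

-- ===== CLAIM (what is proved, stated in full; the proofs are below) =====
def Claim_equal_check_if_winning : Prop := ∀ (winning_numbers : List (List String)) (my_numbers : List (List String)), Dom_check_if_winning winning_numbers my_numbers → Pre_check_if_winning winning_numbers my_numbers → Spec_check_if_winning winning_numbers my_numbers (check_if_winning winning_numbers my_numbers)


-- ===== LEMMAS AND PROOFS =====

-- per-card value computed by A
def pvRowA (ws lst : List String) : Int :=
  lst.foldl
    (fun count num =>
      if num = "" then count
      else if ws.contains num then count + 1
      else count)
    (0 : Int)

-- per-card value computed by B
def pvRowB (ws lst : List String) : Int :=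
  (PySem.Set.ofList ws).foldl
    (fun s w =>
      s + ((lst.filter (fun n => n ≠ "")).foldl
            (fun d n => d.insert n (d.getD n 0 + 1)) PySem.Dict.empty).getD w 0)
    (0 : Int)

theorem pvFoldl_add_shift (f : String → Int) (t : List String) : ∀ (a b : Int),
    t.foldl (fun s w => s + f w) (a + b) = t.foldl (fun s w => s + f w) a + b := by
  induction t with
  | nil => intro a b; simp
  | cons x t ih =>
    intro a b
    simp only [List.foldl_cons]
    rw [show a + b + f x = a + f x + b by ring, ih]

theorem pvRowA_acc (ws lst : List String) : ∀ c : Int,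
    lst.foldl
      (fun count num =>
        if num = "" then count
        else if ws.contains num then count + 1
        else count) c
      = c + (lst.countP (fun n => !(n == "") && ws.contains n) : Int) := by
  induction lst with
  | nil => simp
  | cons x t ih =>
    intro c
    simp only [List.foldl_cons, List.countP_cons, ih]
    by_cases hx : x = "" <;> by_cases hw : x ∈ ws <;>
      simp [hx, hw, List.contains_iff_mem] <;> push_cast <;> ring

theorem pvSum_cons (ds : List String) (x : String) (l : List String) :
    ∀ s : Int,
      ds.Nodup →
      ds.foldl (fun s w => s + (((x :: l).count w : Nat) : Int)) s
        = ds.foldl (fun s w => s + ((l.count w : Nat) : Int)) s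
          + (if x ∈ ds then 1 else 0) := by
  induction ds with
  | nil => simp
  | cons d t ih =>
    intro s hnd
    rcases List.nodup_cons.mp hnd with ⟨hd, ht⟩
    simp only [List.foldl_cons]
    rw [ih _ ht]
    have hc : (((x :: l).count d : Nat) : Int)
        = ((l.count d : Nat) : Int) + (if x ∈ t then 0 else if x = d then 1 else 0) := by
      by_cases h : x = d
      · subst h
        have hxt : x ∉ t := hd
        simp [hxt, List.count_cons_self]
      · have hdx : ¬ d = x := fun hh => h hh.symm
        simp [List.count_cons, h, hdx]
    rw [hc, ← add_assoc, pvFoldl_add_shift]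
    by_cases hxd : x = d
    · subst hxd
      have hxt : x ∉ t := hd
      simp [hxt]
    · by_cases hxt : x ∈ t <;> simp [hxt, hxd] <;> ring

theorem pvCountP_eq_sum (l : List String) (ds : List String) (hnd : ds.Nodup) :
    ((l.countP (fun n => decide (n ∈ ds)) : Nat) : Int)
      = ds.foldl (fun s w => s + ((l.count w : Nat) : Int)) 0 := by
  induction l with
  | nil =>
    simp only [List.countP_nil, List.count_nil]
    clear hnd
    rw [show (((0:Nat)):Int) = 0 by simp]
    induction ds with
    | nil => simp
    | cons d t ih2 => simpa using ih2
  | cons x t ih =>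
    rw [List.countP_cons, pvSum_cons ds x t 0 hnd, ← ih]
    by_cases hx : x ∈ ds <;> simp [hx] <;> push_cast <;> ring

theorem pvRow_eq (ws lst : List String) : pvRowA ws lst = pvRowB ws lst := by
  unfold pvRowA pvRowB
  rw [pvRowA_acc, zero_add]
  simp only [PySem.Dict.foldl_insert_getD_add_one_eq_counter, PySem.Dict.getD_counter]
  have h1 : lst.countP (fun n => !(n == "") && ws.contains n)
      = (lst.filter (fun n => n ≠ "")).countP (fun n => decide (n ∈ PySem.Set.ofList ws)) := by
    rw [List.countP_filter]
    apply List.countP_congr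
    intro a _
    by_cases h1 : a = "" <;> by_cases h2 : a ∈ ws <;>
      simp [h1, h2, PySem.Set.mem_ofList, List.contains_iff_mem]
  rw [h1, pvCountP_eq_sum _ _ (PySem.Set.nodup_ofList ws)]

theorem pvOuter (wfull : List (List String)) :
    ∀ (my : List (List String)) (k : Nat), k + my.length ≤ wfull.length →
      (PySem.List.enumerate my (k : Int)).map
          (fun p => pvRowA (PySem.List.pyGetD wfull p.1 []) p.2)
        = ((wfull.drop k).zip my).map (fun p => pvRowB p.1 p.2) := by
  intro my
  induction my with
  | nil => simp [PySem.List.enumerate]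
  | cons x t ih =>
    intro k hk
    have hklt : k < wfull.length := by simp at hk; omega
    rw [PySem.List.enumerate_cons, List.drop_eq_getElem_cons hklt]
    simp only [List.zip_cons_cons, List.map_cons]
    have h1 : PySem.List.pyGetD wfull (k : Int) [] = wfull[k] := by
      rw [PySem.List.pyGetD_natCast, List.getD_eq_getElem _ _ hklt]
    have h2 : ((k : Int) + 1) = ((k + 1 : Nat) : Int) := by push_cast; ring
    rw [h1, h2, ih (k + 1) (by simp at hk ⊢; omega), pvRow_eq]

-- ===== VERDICT (by name: the statement is the Claim_ definition above) =====
theorem check_if_winning_spec : Claim_equal_check_if_winning := by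
  intro w m _ hpre
  unfold Spec_check_if_winning check_if_winning check_if_winning_alt
  rw [PySem.List.foldl_append_singleton_eq_map, PySem.List.foldl_append_singleton_eq_map]
  have := pvOuter w m 0 (by simpa using hpre)
  simpa [pvRowA, pvRowB] using this
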